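-- pv_equiv track=rewrite | github.com/mangesh-trimbake/competitive-programming | HackerRank/Mathematics/Algebra/PythagoreanTriple.py | pythagoreanTriple
-- ===== SOURCE A (Python) =====
-- def pythagoreanTriple(n):
--     if n == 4:
--         return 3, 4, 5
--     elif n % 2 == 0:
--         a, b, c = pythagoreanTriple(n//2)
--         return a*2, b*2, c*2
--     else:
--         return n, (n**2 - 1)//2, (n**2 + 1)//2
-- ===== SOURCE B (Python) =====
-- def pythagoreanTriple(n):
--     k = 0
--     while n % 2 == 0 and n != 4:
--         k += 1
--         n //= 2
--     if n == 4:
--         a, b, c = 3, 4, 5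
--     else:
--         a, b, c = n, (n**2 - 1) // 2, (n**2 + 1) // 2
--     s = 2 ** k
--     return a * s, b * s, c * s
-- ===== Notes on version B (the rewrite author's own statement) =====
-- stated objective: alternative
-- what changed: Replaces the halve-and-double recursion with a single iterative loop that strips factors of two while counting them, then scales one base triple by the accumulated power of two.
-- outside the precondition, e.g. on pythagoreanTriple(0): A raises RecursionError, B does not finish within the time limit
import Mathlib
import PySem

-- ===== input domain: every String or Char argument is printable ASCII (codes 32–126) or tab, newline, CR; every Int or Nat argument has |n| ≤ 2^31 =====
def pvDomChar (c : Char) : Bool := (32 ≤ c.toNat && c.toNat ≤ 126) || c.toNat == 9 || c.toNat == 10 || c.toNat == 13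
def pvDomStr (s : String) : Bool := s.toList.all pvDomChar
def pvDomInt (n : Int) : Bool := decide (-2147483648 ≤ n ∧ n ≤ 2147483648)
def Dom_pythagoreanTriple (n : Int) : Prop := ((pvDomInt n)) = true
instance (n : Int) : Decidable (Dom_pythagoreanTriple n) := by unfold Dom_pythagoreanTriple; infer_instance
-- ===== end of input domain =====

-- B replaces A's halve-and-double recursion with one forward loop that counts
-- the stripped factors of two and scales a single base triple (alternative decomposition).

-- ===== PORT A =====
-- Fuel-based transliteration of A's recursion; fuel 40 never runs out on Dom (|n| ≤ 2^31)
-- for n ≠ 0, the inputs Pre_ admits (Python A recurses forever / raises RecursionError at n = 0).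
def pyRecA : Nat → Int → Int × Int × Int
  | 0, _ => (0, 0, 0)
  | f + 1, n =>
    if n = 4 then (3, 4, 5)
    else if PySem.Int.mod n 2 = 0 then
      let t := pyRecA f (PySem.Int.floordiv n 2)
      (t.1 * 2, t.2.1 * 2, t.2.2 * 2)
    else (n, PySem.Int.floordiv (n ^ 2 - 1) 2, PySem.Int.floordiv (n ^ 2 + 1) 2)

def pythagoreanTriple (n : Int) : Int × Int × Int := pyRecA 40 n

-- ===== PORT B =====
-- Fuel-based transliteration of B's while loop (same fuel bound, same reason).
def pyLoopB : Nat → Int → Nat → Int × Int × Int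
  | 0, _, _ => (0, 0, 0)
  | f + 1, n, k =>
    if PySem.Int.mod n 2 = 0 ∧ n ≠ 4 then pyLoopB f (PySem.Int.floordiv n 2) (k + 1)
    else
      let t : Int × Int × Int :=
        if n = 4 then (3, 4, 5)
        else (n, PySem.Int.floordiv (n ^ 2 - 1) 2, PySem.Int.floordiv (n ^ 2 + 1) 2)
      let s : Int := 2 ^ k
      (t.1 * s, t.2.1 * s, t.2.2 * s)

def pythagoreanTriple_alt (n : Int) : Int × Int × Int := pyLoopB 40 n 0

-- ===== PRECONDITION & SPEC =====
-- Pre_ excludes exactly n = 0, where Python A raises RecursionError (and B's loop never ends).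
def Pre_pythagoreanTriple (n : Int) : Prop := n ≠ 0
instance (n : Int) : Decidable (Pre_pythagoreanTriple n) := by unfold Pre_pythagoreanTriple; infer_instance
def pvWitness_pythagoreanTriple : Int := 5

def Spec_pythagoreanTriple (n : Int) (out : Int × Int × Int) : Prop := out = pythagoreanTriple_alt n
instance (n : Int) (out : Int × Int × Int) : Decidable (Spec_pythagoreanTriple n out) := by unfold Spec_pythagoreanTriple; infer_instance

-- ===== CLAIM (what is proved, stated in full; the proofs are below) =====
def Claim_equal_pythagoreanTriple : Prop := ∀ (n : Int), Dom_pythagoreanTriple n → Pre_pythagoreanTriple n → Spec_pythagoreanTriple n (pythagoreanTriple n)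

-- ===== LEMMAS AND PROOFS =====

-- B's loop state (n, k) computes exactly A's recursion result scaled by 2^k, at every fuel.
theorem pyLoopB_eq_scaled (f : Nat) : ∀ (n : Int) (k : Nat),
    pyLoopB f n k = ((pyRecA f n).1 * 2 ^ k, (pyRecA f n).2.1 * 2 ^ k, (pyRecA f n).2.2 * 2 ^ k) := by
  induction f with
  | zero => intro n k; simp [pyLoopB, pyRecA]
  | succ f ih =>
    intro n k
    by_cases h4 : n = 4
    · simp [pyLoopB, pyRecA, h4]
    · by_cases he : PySem.Int.mod n 2 = 0
      · have hc : PySem.Int.mod n 2 = 0 ∧ n ≠ 4 := ⟨he, h4⟩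
        have he' : n % 2 = 0 := by
          have := (PySem.Int.mod_eq_zero_iff_dvd n 2).mp he
          omega
        have hstep : pyLoopB (f + 1) n k = pyLoopB f (PySem.Int.floordiv n 2) (k + 1) := by
          simp [pyLoopB, hc, he']
        rw [hstep, ih]
        have hA : pyRecA (f + 1) n =
            ((pyRecA f (PySem.Int.floordiv n 2)).1 * 2,
             (pyRecA f (PySem.Int.floordiv n 2)).2.1 * 2,
             (pyRecA f (PySem.Int.floordiv n 2)).2.2 * 2) := by
          simp [pyRecA, h4, he']
        rw [hA]
        simp only [pow_succ]
        refine Prod.ext (by ring) (Prod.ext (by ring) (by ring))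
      · have hd : ¬ (2:Int) ∣ n := by
          rw [← PySem.Int.mod_eq_zero_iff_dvd]; exact he
        simp [pyLoopB, pyRecA, h4, hd]

-- ===== VERDICT (by name: the statement is the Claim_ definition above) =====
theorem pythagoreanTriple_spec : Claim_equal_pythagoreanTriple := by
  intro n _ _
  unfold Spec_pythagoreanTriple pythagoreanTriple pythagoreanTriple_alt
  rw [pyLoopB_eq_scaled]
  simp
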